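-- pv_equiv track=rewrite | github.com/harsh-chaudhary999/forge | tools/scan_forge/fs_util.py | path_under_submodule
-- ===== SOURCE A (Python) =====
-- def path_under_submodule(rel_posix: str, submodules: list[str]) -> bool:
--     for sm in submodules:
--         sm = sm.strip().strip("/")
--         if not sm:
--             continue
--         if rel_posix == sm or rel_posix.startswith(sm + "/"):
--             return True
--     return False
-- ===== SOURCE B (Python) =====
-- def path_under_submodule(rel_posix: str, submodules: list[str]) -> bool:
--     names = {c for c in (sm.strip().strip("/") for sm in submodules) if c}
--     candidates = [rel_posix] + [rel_posix[:i] for i, ch in enumerate(rel_posix) if ch == "/"]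
--     return any(c in names for c in candidates)
-- ===== Notes on version B (the rewrite author's own statement) =====
-- stated objective: alternative
-- what changed: Instead of scanning submodules and testing each cleaned name against the path with ==/startswith, B builds a set of cleaned submodule names once and checks the path's ancestor prefixes (the path itself plus each cut at a '/' boundary) for membership in that set.
import Mathlib
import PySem

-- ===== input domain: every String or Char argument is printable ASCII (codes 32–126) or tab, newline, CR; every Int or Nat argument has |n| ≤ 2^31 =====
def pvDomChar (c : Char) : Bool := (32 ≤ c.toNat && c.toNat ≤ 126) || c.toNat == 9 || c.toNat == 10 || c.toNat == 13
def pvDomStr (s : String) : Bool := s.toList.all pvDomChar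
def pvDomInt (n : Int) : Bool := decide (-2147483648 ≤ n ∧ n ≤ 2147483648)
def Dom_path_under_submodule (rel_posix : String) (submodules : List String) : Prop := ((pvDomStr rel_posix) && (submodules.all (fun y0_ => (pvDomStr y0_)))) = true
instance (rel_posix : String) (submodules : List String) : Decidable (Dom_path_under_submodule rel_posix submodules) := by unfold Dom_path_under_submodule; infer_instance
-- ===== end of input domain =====

-- B builds a set of cleaned submodule names once and tests the path's '/'-boundary prefixes
-- against it, instead of A's scan over submodules testing each entry with ==/startswith.

-- sm.strip().strip("/")  (the cleaning step both Pythons apply)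
def pvClean (sm : String) : String := PySem.Str.stripChars (PySem.Str.strip sm) "/"

-- ===== PORT A =====
def path_under_submodule (rel_posix : String) (submodules : List String) : Bool :=
  match submodules with
  | [] => false
  | sm :: rest =>
    let c := pvClean sm
    if c = "" then path_under_submodule rel_posix rest
    else if rel_posix == c || PySem.Str.startswith rel_posix (c ++ "/") then true
    else path_under_submodule rel_posix rest

-- ===== PORT B =====
def path_under_submodule_alt (rel_posix : String) (submodules : List String) : Bool :=
  let names : PySem.Set String :=
    PySem.Set.ofList ((submodules.map pvClean).filter (fun c => !(c == "")))
  let candidates : List String :=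
    rel_posix :: (PySem.List.enumerate rel_posix.toList 0).filterMap
      (fun p => if p.2 == '/' then some (PySem.Str.slice rel_posix none (some p.1)) else none)
  candidates.any (fun c => PySem.Set.contains names c)

-- ===== PRECONDITION & SPEC =====
def Spec_path_under_submodule (rel_posix : String) (submodules : List String) (out : Bool) : Prop := out = path_under_submodule_alt rel_posix submodules
instance (rel_posix : String) (submodules : List String) (out : Bool) : Decidable (Spec_path_under_submodule rel_posix submodules out) := by unfold Spec_path_under_submodule; infer_instance

-- ===== CLAIM (what is proved, stated in full; the proofs are below) =====
def Claim_equal_path_under_submodule : Prop := ∀ (rel_posix : String) (submodules : List String), Dom_path_under_submodule rel_posix submodules → Spec_path_under_submodule rel_posix submodules (path_under_submodule rel_posix submodules)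

-- ===== LEMMAS AND PROOFS =====

-- the shared semantic reading of both programs
def pvHit (rel : String) (subs : List String) : Prop :=
  ∃ sm ∈ subs, pvClean sm ≠ "" ∧
    (rel = pvClean sm ∨ PySem.Str.startswith rel (pvClean sm ++ "/") = true)

lemma portA_iff (rel : String) (subs : List String) :
    path_under_submodule rel subs = true ↔ pvHit rel subs := by
  induction subs with
  | nil => simp [path_under_submodule, pvHit]
  | cons sm rest ih =>
    simp only [path_under_submodule, pvHit, List.exists_mem_cons_iff] at *
    by_cases hc : pvClean sm = ""
    · simpa [hc] using ih
    · by_cases hm : (rel == pvClean sm || PySem.Str.startswith rel (pvClean sm ++ "/")) = true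
      · simp only [hc, if_false, hm, if_true]
        constructor
        · intro _
          exact Or.inl ⟨hc, by simpa [beq_iff_eq] using hm⟩
        · intro _; trivial
      · have hne : ¬(rel = pvClean sm) ∧ PySem.Str.startswith rel (pvClean sm ++ "/") = false := by
          simpa [beq_iff_eq] using eq_false_of_ne_true hm
        simp only [hc, if_false, eq_false_of_ne_true hm, Bool.false_eq_true, ih]
        constructor
        · exact Or.inr
        · rintro (⟨-, h | h⟩ | h)
          · exact absurd h hne.1
          · exact absurd h (ne_true_of_eq_false hne.2)
          · exact h

lemma startswith_slash_iff (c r : List Char) :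
    (c ++ ['/']) <+: r ↔ ∃ i, ∃ _ : i < r.length, r[i] = '/' ∧ c = r.take i := by
  constructor
  · rintro ⟨t, ht⟩
    refine ⟨c.length, ?_, ?_, ?_⟩ <;> subst ht <;>
      simp [List.getElem_append_right]
  · rintro ⟨i, hi, hsl, hc⟩
    refine ⟨r.drop (i+1), ?_⟩
    subst hc
    rw [List.append_assoc]
    have := List.take_append_drop i r
    rw [List.drop_eq_getElem_cons hi] at this
    simpa [hsl] using this

lemma slash_toList : ("/" : String).toList = ['/'] := by decide

lemma slice_toList_take (rel : String) (k : Nat) :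
    (PySem.Str.slice rel none (some (k : Int))).toList = rel.toList.take k := by
  simp [PySem.List.slice_to_natCast]

lemma startswith_iff_str (rel c : String) :
    PySem.Str.startswith rel (c ++ "/") = true ↔ (c.toList ++ ['/']) <+: rel.toList := by
  rw [PySem.Str.startswith_eq, PySem.Chars.startswith_iff, String.toList_append, slash_toList]

lemma portB_iff (rel : String) (subs : List String) :
    path_under_submodule_alt rel subs = true ↔ pvHit rel subs := by
  unfold path_under_submodule_alt pvHit
  simp only [List.any_eq_true, PySem.Set.contains_iff, PySem.Set.mem_ofList]
  constructor
  · rintro ⟨cand, hcand, hmem⟩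
    obtain ⟨hmap, hneb⟩ := List.mem_filter.mp hmem
    obtain ⟨sm, hsm, hcl⟩ := List.mem_map.mp hmap
    have hne : cand ≠ "" := by simpa using hneb
    refine ⟨sm, hsm, by rw [hcl]; exact hne, ?_⟩
    rcases List.mem_cons.mp hcand with rfl | hcand
    · exact Or.inl hcl.symm
    · obtain ⟨p, hp, hpc⟩ := List.mem_filterMap.mp hcand
      obtain ⟨hch, hpc⟩ : p.2 = '/' ∧ PySem.Str.slice rel none (some p.1) = cand := by
        by_cases h : p.2 = '/'
        · refine ⟨h, ?_⟩; simpa [h] using hpc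
        · simp [h] at hpc
      obtain ⟨k, hk, hpk⟩ := (PySem.List.mem_enumerate_iff _ _ _).mp hp
      have hp1 : p.1 = (k : Int) := by rw [hpk]; simp
      have hcandL : cand.toList = rel.toList.take k := by
        rw [← hpc, hp1, slice_toList_take]
      have hgetc : rel.toList[k] = '/' := by
        have : p.2 = rel.toList[k] := by rw [hpk]
        rw [← this, hch]
      right
      rw [hcl, startswith_iff_str]
      exact (startswith_slash_iff _ _).mpr ⟨k, hk, hgetc, hcandL⟩
  · rintro ⟨sm, hsm, hne, hcase⟩
    have hmem : pvClean sm ∈ (subs.map pvClean).filter (fun c => !(c == "")) :=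
      List.mem_filter.mpr ⟨List.mem_map.mpr ⟨sm, hsm, rfl⟩, by simpa using hne⟩
    rcases hcase with hrel | hsw
    · exact ⟨rel, List.mem_cons_self, by rw [hrel]; exact hmem⟩
    · obtain ⟨i, hi, hsl, hcl⟩ := (startswith_slash_iff _ _).mp ((startswith_iff_str rel _).mp hsw)
      refine ⟨PySem.Str.slice rel none (some ((0 : Int) + (i : Int))), ?_, ?_⟩
      · refine List.mem_cons.mpr (Or.inr (List.mem_filterMap.mpr
          ⟨((0 : Int) + (i : Int), rel.toList[i]), ?_, ?_⟩))
        · exact (PySem.List.mem_enumerate_iff _ _ _).mpr ⟨i, hi, rfl⟩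
        · simp [hsl]
      · have : PySem.Str.slice rel none (some ((0 : Int) + (i : Int))) = pvClean sm := by
          apply String.toList_inj.mp
          rw [show ((0 : Int) + (i : Int)) = (i : Int) by ring, slice_toList_take, ← hcl]
        rw [this]; exact hmem

-- ===== VERDICT (by name: the statement is the Claim_ definition above) =====
theorem path_under_submodule_spec : Claim_equal_path_under_submodule := by
  intro rel subs _
  unfold Spec_path_under_submodule
  have h := (portA_iff rel subs).trans (portB_iff rel subs).symm
  exact Bool.eq_iff_iff.mpr h
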